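-- pv_equiv track=rewrite | github.com/ENCODE-DCC/ptools | pbam2bam/pbam2bam.py | CheckAS
-- ===== SOURCE A (Python) =====
-- def CheckAS(pBAMline):
--     array = pBAMline.split("\t")
--     AScolumn = -1
--     for i in range(0, len(array)):
--         if "AS:" in array[i]:
--             AScolumn = i
--             break
--     return AScolumn
-- ===== SOURCE B (Python) =====
-- def CheckAS(pBAMline):
--     pos = pBAMline.find("AS:")
--     if pos == -1:
--         return -1
--     return pBAMline[:pos].count("\t")
-- ===== Notes on version B (the rewrite author's own statement) =====
-- stated objective: simpler
-- what changed: Instead of splitting the line into a tab-separated column list and scanning it for a column containing 'AS:', B finds the leftmost occurrence of 'AS:' directly and returns the number of tabs before it (which is the index of the column it falls in), -1 if absent.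
import Mathlib
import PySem

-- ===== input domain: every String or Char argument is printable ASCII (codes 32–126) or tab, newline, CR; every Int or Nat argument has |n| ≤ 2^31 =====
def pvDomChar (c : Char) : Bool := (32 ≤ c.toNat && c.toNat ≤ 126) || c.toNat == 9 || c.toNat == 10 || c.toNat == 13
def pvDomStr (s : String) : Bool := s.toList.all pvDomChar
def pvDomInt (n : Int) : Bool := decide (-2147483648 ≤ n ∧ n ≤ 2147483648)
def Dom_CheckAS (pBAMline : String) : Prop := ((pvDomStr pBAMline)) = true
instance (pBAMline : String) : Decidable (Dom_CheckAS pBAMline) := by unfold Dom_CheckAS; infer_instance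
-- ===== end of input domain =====

-- B replaces A's split-into-columns-and-scan by "find 'AS:', then count the tabs before it" (objective: simpler).

-- ===== PORT A =====
-- the for-loop over range(0, len(array)) with break: first index whose column contains "AS:", else -1
def CheckASGo : List (List Char) → Int → Int
  | [], _ => -1
  | a :: rest, i => if PySem.Chars.isIn "AS:".toList a then i else CheckASGo rest (i + 1)

def CheckAS (pBAMline : String) : Int :=
  CheckASGo (PySem.Chars.splitOn pBAMline.toList "\t".toList) 0

-- ===== PORT B =====
def CheckAS_alt (pBAMline : String) : Int :=
  let pos := PySem.Str.find pBAMline "AS:"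
  if pos = -1 then -1
  else ((PySem.Chars.count (PySem.Chars.slice pBAMline.toList none (some pos)) "\t".toList : Nat) : Int)

-- ===== PRECONDITION & SPEC =====
def Spec_CheckAS (pBAMline : String) (out : Int) : Prop := out = CheckAS_alt pBAMline
instance (pBAMline : String) (out : Int) : Decidable (Spec_CheckAS pBAMline out) := by unfold Spec_CheckAS; infer_instance

-- ===== CLAIM (what is proved, stated in full; the proofs are below) =====
def Claim_equal_CheckAS : Prop := ∀ (pBAMline : String), Dom_CheckAS pBAMline → Spec_CheckAS pBAMline (CheckAS pBAMline)

-- ===== LEMMAS AND PROOFS =====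

-- reference single-char split (proof-side only)
def mySplit : List Char → List (List Char)
  | [] => [[]]
  | c :: rest =>
      if c = '\t' then [] :: mySplit rest
      else (c :: (mySplit rest).headI) :: (mySplit rest).tail

theorem mySplit_ne_nil (cs : List Char) : mySplit cs ≠ [] := by
  cases cs with
  | nil => simp [mySplit]
  | cons c rest => simp only [mySplit]; split <;> simp

theorem mySplit_headI_tail (cs : List Char) :
    (mySplit cs).headI :: (mySplit cs).tail = mySplit cs := by
  cases h : mySplit cs with
  | nil => exact absurd h (mySplit_ne_nil cs)
  | cons a t => simp

theorem splitOn_go_tab : ∀ (fuel : Nat) (l cur : List Char) (acc : List (List Char)),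
    l.length < fuel →
    PySem.Chars.splitOn.go ['\t'] fuel l cur acc
      = acc.reverse ++ (mySplit l).modifyHead (cur.reverse ++ ·) := by
  intro fuel
  induction fuel with
  | zero => intro l cur acc h; omega
  | succ fuel ih =>
    intro l cur acc h
    cases l with
    | nil =>
      simp [PySem.Chars.splitOn.go, mySplit]
    | cons c rest =>
      rw [PySem.Chars.splitOn.go]
      by_cases hc : c = '\t'
      · subst hc
        have hp : List.isPrefixOf ['\t'] ('\t' :: rest) = true := by
          simp [List.isPrefixOf]
        rw [if_pos hp, ih _ _ _ (by simpa using Nat.lt_of_succ_lt_succ h)]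
        have hid : ∀ (m : List (List Char)), List.modifyHead (fun x : List Char => x) m = m := by
          intro m; cases m <;> simp
        simp [mySplit, hid]
      · have hp : List.isPrefixOf ['\t'] (c :: rest) = false := by
          simp [List.isPrefixOf]
          exact fun hh => hc hh.symm
        rw [if_neg (by simp [hp]), ih _ _ _ (by simpa using Nat.lt_of_succ_lt_succ h)]
        rw [mySplit]
        rw [if_neg hc]
        rw [← mySplit_headI_tail rest]
        simp [List.modifyHead]

theorem splitOn_eq_mySplit (cs : List Char) :
    PySem.Chars.splitOn cs "\t".toList = mySplit cs := by
  have h : "\t".toList = ['\t'] := rfl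
  rw [h, PySem.Chars.splitOn, splitOn_go_tab (cs.length + 1) cs [] [] (by omega)]
  rw [← mySplit_headI_tail cs]
  simp [List.modifyHead]

theorem count_single_char : ∀ (fuel : Nat) (l : List Char) (acc : Nat), l.length ≤ fuel →
    PySem.Chars.count.go ['\t'] fuel l acc = acc + l.count '\t' := by
  intro fuel
  induction fuel with
  | zero =>
    intro l acc h
    have : l = [] := List.length_eq_zero_iff.mp (Nat.le_zero.mp h)
    subst this
    simp [PySem.Chars.count.go]
  | succ fuel ih =>
    intro l acc h
    cases l with
    | nil => simp [PySem.Chars.count.go]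
    | cons c rest =>
      rw [PySem.Chars.count.go]
      by_cases hc : c = '\t'
      · subst hc
        rw [if_pos (by simp [List.isPrefixOf])]
        rw [ih _ _ (by simpa using Nat.lt_succ_iff.mp (by simpa using h))]
        simp
        omega
      · rw [if_neg (by simp [List.isPrefixOf]; exact fun hh => hc hh.symm)]
        rw [ih _ _ (by simpa using Nat.lt_succ_iff.mp (by simpa using h))]
        simp [hc]

theorem chars_count_tab (l : List Char) :
    PySem.Chars.count l "\t".toList = l.count '\t' := by
  have h : "\t".toList = ['\t'] := rfl
  rw [h, PySem.Chars.count]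
  rw [if_neg (by simp)]
  rw [count_single_char l.length l 0 le_rfl]
  omega


-- A's loop, in terms of List.findIdx?
theorem checkASGo_eq (xs : List (List Char)) : ∀ (i : Int),
    CheckASGo xs i
      = (match xs.findIdx? (fun a => PySem.Chars.isIn ['A','S',':'] a) with
         | none => (-1 : Int)
         | some k => i + k) := by
  induction xs with
  | nil => intro i; simp [CheckASGo]
  | cons a rest ih =>
    intro i
    rw [CheckASGo, List.findIdx?_cons]
    simp only [show ("AS:".toList : List Char) = ['A','S',':'] from rfl]
    by_cases hp : PySem.Chars.isIn ['A','S',':'] a = true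
    · simp [hp]
    · rw [if_neg hp, if_neg hp, ih (i + 1)]
      cases rest.findIdx? (fun a => PySem.Chars.isIn ['A','S',':'] a) with
      | none => simp
      | some k => simp only [Option.map_some]; push_cast; ring

-- find = k when there is an occurrence at k and none before it
theorem find_eq_of {cs sub : List Char} {k : Nat}
    (h1 : sub <+: cs.drop k) (h2 : ∀ i < k, ¬ sub <+: cs.drop i) :
    PySem.Chars.find cs sub = (k : Int) := by
  have hin : sub <:+: cs := h1.isInfix.trans (List.drop_suffix k cs).isInfix
  have hnn : 0 ≤ PySem.Chars.find cs sub := (PySem.Chars.find_nonneg_iff cs sub).mpr hin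
  obtain ⟨hpre, hmin⟩ := PySem.Chars.find_spec hnn
  rcases Nat.lt_trichotomy (PySem.Chars.find cs sub).toNat k with hlt | heq | hgt
  · exact absurd hpre (h2 _ hlt)
  · rw [← heq, Int.toNat_of_nonneg hnn]
  · exact absurd h1 (hmin k hgt)

theorem not_pre_tab (rest : List Char) : ¬ (['A','S',':'] <+: '\t' :: rest) := by
  intro h
  have h' : 'A' :: "S:".toList <+: '\t' :: rest := h
  rw [List.cons_prefix_cons] at h'
  exact absurd h'.1 (by decide)

-- head column of the split = longest tab-free prefix
theorem mySplit_headI (cs : List Char) :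
    (mySplit cs).headI = cs.takeWhile (fun x => x != '\t') := by
  induction cs with
  | nil => simp [mySplit]
  | cons c rest ih =>
    by_cases hc : c = '\t'
    · subst hc; simp [mySplit]
    · rw [mySplit, if_neg hc, List.takeWhile_cons_of_pos (by simp [hc])]
      simp [ih]

theorem prefix_takeWhile_of_no_tab : ∀ (l cs : List Char),
    l <+: cs → (∀ a ∈ l, a ≠ '\t') → l <+: cs.takeWhile (fun x => x != '\t') := by
  intro l
  induction l with
  | nil => intro cs _ _; exact List.nil_prefix
  | cons a l ih =>
    intro cs hpre hno
    rcases hpre with ⟨t, rfl⟩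
    rw [List.cons_append, List.takeWhile_cons_of_pos (by simp [hno a (by simp)])]
    rw [List.cons_prefix_cons]
    exact ⟨rfl, ih (l ++ t) (List.prefix_append l t) (fun x hx => hno x (by simp [hx]))⟩

-- the central equation, on the character list
theorem main_eq : ∀ cs : List Char,
    (match (mySplit cs).findIdx? (fun a => PySem.Chars.isIn ['A','S',':'] a) with
     | none => (-1 : Int)
     | some k => (k : Int))
      = (if PySem.Chars.find cs ['A','S',':'] = -1 then (-1 : Int)
         else ((cs.take (PySem.Chars.find cs ['A','S',':']).toNat).count '\t' : Int)) := by
  intro cs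
  induction cs with
  | nil => decide
  | cons c rest ih =>
    by_cases hc : c = '\t'
    · -- a tab: first column is empty, everything shifts by one
      subst hc
      rw [mySplit, if_pos rfl, List.findIdx?_cons, if_neg (by decide)]
      by_cases hf : PySem.Chars.find rest ['A','S',':'] = -1
      · rw [hf, if_pos rfl] at ih
        have hnone : (mySplit rest).findIdx? (fun a => PySem.Chars.isIn ['A','S',':'] a) = none := by
          cases hI : (mySplit rest).findIdx? (fun a => PySem.Chars.isIn ['A','S',':'] a) with
          | none => rfl
          | some k => rw [hI] at ih; simp at ih
        rw [hnone]
        have hcs : PySem.Chars.find ('\t' :: rest) ['A','S',':'] = -1 := by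
          rw [PySem.Chars.find_eq_neg_one_iff] at hf ⊢
          intro hinf
          rcases List.infix_cons_iff.mp hinf with hpre | hinf'
          · exact not_pre_tab rest hpre
          · exact hf hinf'
        rw [hcs]
        simp
      · have hg : 0 ≤ PySem.Chars.find rest ['A','S',':'] := by
          have := PySem.Chars.neg_one_le_find rest ['A','S',':']
          omega
        obtain ⟨hpre, hmin⟩ := PySem.Chars.find_spec hg
        have hcs : PySem.Chars.find ('\t' :: rest) ['A','S',':']
            = ((PySem.Chars.find rest ['A','S',':']).toNat + 1 : Nat) := by
          apply find_eq_of
          · simpa using hpre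
          · intro i hi
            cases i with
            | zero => exact not_pre_tab rest
            | succ i' => intro hp; exact hmin i' (by omega) (by simpa using hp)
        rw [if_neg hf] at ih
        rw [hcs, if_neg (by push_cast; omega)]
        cases hI : (mySplit rest).findIdx? (fun a => PySem.Chars.isIn ['A','S',':'] a) with
        | none => rw [hI] at ih; simp at ih
        | some k =>
          rw [hI] at ih
          simp at ih
          simp only [Option.map_some, Int.toNat_natCast, List.take_succ_cons]
          simp
          omega
    · -- an ordinary character: it is prepended to the first column
      rw [mySplit, if_neg hc]
      have hsplit := mySplit_headI_tail rest
      have hhead := mySplit_headI rest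
      have hTW : (c :: rest).takeWhile (fun x => x != '\t') = c :: (mySplit rest).headI := by
        rw [List.takeWhile_cons_of_pos (by simp [hc]), hhead]
      by_cases hin : PySem.Chars.isIn ['A','S',':'] (c :: (mySplit rest).headI) = true
      · -- "AS:" occurs inside the first column: A returns 0, and no tab precedes the match
        rw [List.findIdx?_cons, if_pos hin]
        obtain ⟨j, hj⟩ :=
          (PySem.Chars.exists_prefix_drop_iff_isIn ['A','S',':'] (c :: (mySplit rest).headI)).mpr hin
        rw [← hTW] at hj
        have hjlt : j < ((c :: rest).takeWhile (fun x => x != '\t')).length := by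
          by_contra h'
          rw [List.drop_eq_nil_of_le (Nat.not_lt.mp h')] at hj
          exact absurd (List.prefix_nil.mp hj) (by decide)
        obtain ⟨t2, ht2⟩ := List.takeWhile_prefix (l := c :: rest) (fun x => x != '\t')
        have hcs_j : ['A','S',':'] <+: (c :: rest).drop j := by
          rw [← ht2, List.drop_append_of_le_length (by omega)]
          exact hj.trans (List.prefix_append _ _)
        have hnn : 0 ≤ PySem.Chars.find (c :: rest) ['A','S',':'] :=
          (PySem.Chars.find_nonneg_iff _ _).mpr
            (hcs_j.isInfix.trans (List.drop_suffix j _).isInfix)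
        obtain ⟨hpre, hmin⟩ := PySem.Chars.find_spec hnn
        have hfj : (PySem.Chars.find (c :: rest) ['A','S',':']).toNat ≤ j := by
          by_contra h'
          exact hmin j (by omega) hcs_j
        have htake : ∀ n : Nat, n ≤ ((c :: rest).takeWhile (fun x => x != '\t')).length →
            (c :: rest).take n = ((c :: rest).takeWhile (fun x => x != '\t')).take n := by
          intro n hn
          conv_lhs => rw [← ht2]
          exact List.take_append_of_le_length hn
        have hcount : ((c :: rest).take (PySem.Chars.find (c :: rest) ['A','S',':']).toNat).count '\t' = 0 := by
          rw [htake _ (le_trans hfj (le_of_lt hjlt))]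
          refine List.count_eq_zero.mpr ?_
          intro hmem
          have := List.mem_takeWhile_imp (List.mem_of_mem_take hmem)
          simp at this
        rw [if_neg (by omega), hcount]
      · -- "AS:" is not in the first column: both sides reduce to the tail of the line
        rw [List.findIdx?_cons, if_neg hin]
        have pASh : PySem.Chars.isIn ['A','S',':'] (mySplit rest).headI = false := by
          by_contra h'
          rw [Bool.not_eq_false, PySem.Chars.isIn_iff_infix] at h'
          exact hin ((PySem.Chars.isIn_iff_infix _ _).mpr (List.infix_cons_iff.mpr (Or.inr h')))
        rw [← hsplit, List.findIdx?_cons, if_neg (by simp [pASh])] at ih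
        have not_pre0 : ¬ (['A','S',':'] <+: c :: rest) := by
          intro hp
          have h2 := prefix_takeWhile_of_no_tab ['A','S',':'] (c :: rest) hp
            (by intro a ha; fin_cases ha <;> decide)
          rw [hTW] at h2
          exact absurd ((PySem.Chars.isIn_iff_infix _ _).mpr h2.isInfix) (by simp [hin])
        by_cases hf : PySem.Chars.find rest ['A','S',':'] = -1
        · have hcs : PySem.Chars.find (c :: rest) ['A','S',':'] = -1 := by
            rw [PySem.Chars.find_eq_neg_one_iff] at hf ⊢
            intro hinf
            rcases List.infix_cons_iff.mp hinf with hpre | hinf'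
            · exact not_pre0 hpre
            · exact hf hinf'
          rw [hcs, if_pos rfl]
          rw [hf, if_pos rfl] at ih
          cases hI : ((mySplit rest).tail).findIdx? (fun a => PySem.Chars.isIn ['A','S',':'] a) with
          | none => simp
          | some k => rw [hI] at ih; simp at ih; exact ((by omega : ¬((k:ℤ) + 1 = -1)) ih).elim
        · have hg : 0 ≤ PySem.Chars.find rest ['A','S',':'] := by
            have := PySem.Chars.neg_one_le_find rest ['A','S',':']
            omega
          obtain ⟨hpre, hmin⟩ := PySem.Chars.find_spec hg
          have hcs : PySem.Chars.find (c :: rest) ['A','S',':']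
              = ((PySem.Chars.find rest ['A','S',':']).toNat + 1 : Nat) := by
            apply find_eq_of
            · simpa using hpre
            · intro i hi
              cases i with
              | zero => exact not_pre0
              | succ i' => intro hp; exact hmin i' (by omega) (by simpa using hp)
          rw [if_neg hf] at ih
          rw [hcs, if_neg (by push_cast; omega)]
          cases hI : ((mySplit rest).tail).findIdx? (fun a => PySem.Chars.isIn ['A','S',':'] a) with
          | none => rw [hI] at ih; simp at ih
          | some k =>
            rw [hI] at ih
            simp at ih
            simp only [Option.map_some, Int.toNat_natCast, List.take_succ_cons]
            simp [hc]
            omega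

-- ===== VERDICT (by name: the statement is the Claim_ definition above) =====
theorem CheckAS_spec : Claim_equal_CheckAS := by
  intro s _
  show CheckAS s = CheckAS_alt s
  unfold CheckAS CheckAS_alt
  rw [splitOn_eq_mySplit, checkASGo_eq]
  simp only [zero_add, PySem.Str.find_eq,
    show ("AS:".toList : List Char) = ['A','S',':'] from rfl,
    PySem.Chars.slice_eq_listSlice]
  by_cases hf : PySem.Chars.find s.toList ['A','S',':'] = -1
  · rw [if_pos hf]
    have h := main_eq s.toList
    rw [hf, if_pos rfl] at h
    exact h
  · rw [if_neg hf]
    have hnn : 0 ≤ PySem.Chars.find s.toList ['A','S',':'] := by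
      have := PySem.Chars.neg_one_le_find s.toList ['A','S',':']
      omega
    rw [PySem.List.slice_to _ hnn]
    have h := main_eq s.toList
    rw [if_neg hf] at h
    rw [h, chars_count_tab]
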